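-- pv_equiv track=rewrite | github.com/YoungChanShin/codingtest | programmers/winterCoding/지형편집/03.py | solution
-- ===== SOURCE A (Python) =====
-- def solution(land, P, Q):
--     N = len(land)**2
--     combined = []
--     for i in land:
--         combined.extend(i)
--     combined.sort()
--     cost = - combined[0]* N * Q + sum(combined) * Q
--     answer = cost
--     for i in range(1, N):
--         if combined[i] != combined[i-1]:
--             cost += (P * i - Q * (N-i)) * (combined[i] - combined[i-1])
--             if cost > answer: break
--             answer = cost
--     return answer
--
-- land = [[1,1,1], [1,1,1], [1,1,1]]
--
-- P = 5
--
-- Q = 3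
-- ===== SOURCE B (Python) =====
-- def solution(land, P, Q):
--     N = len(land) ** 2
--     combined = sorted(x for row in land for x in row)
--     S = sum(combined)
--     prefix = [0]
--     for x in combined[:N]:
--         prefix.append(prefix[-1] + x)
--     return min(Q * (S - N * combined[k]) + (P + Q) * (k * combined[k] - prefix[k])
--                for k in range(N))
-- ===== Notes on version B (the rewrite author's own statement) =====
-- stated objective: alternative
-- what changed: A's incremental delta scan with a convexity-based early break is replaced by a staged pipeline: build prefix sums of the sorted heights once, evaluate the leveling cost at every candidate index in closed form, and return the global minimum (no running cost, no break).
-- outside the precondition, e.g. on solution([[0, 5], []], 10, 1): A returns 5, B raises IndexError; on solution([[5, -5], [-4, -4]], -8, -10): A returns -120, B returns -224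
import Mathlib
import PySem

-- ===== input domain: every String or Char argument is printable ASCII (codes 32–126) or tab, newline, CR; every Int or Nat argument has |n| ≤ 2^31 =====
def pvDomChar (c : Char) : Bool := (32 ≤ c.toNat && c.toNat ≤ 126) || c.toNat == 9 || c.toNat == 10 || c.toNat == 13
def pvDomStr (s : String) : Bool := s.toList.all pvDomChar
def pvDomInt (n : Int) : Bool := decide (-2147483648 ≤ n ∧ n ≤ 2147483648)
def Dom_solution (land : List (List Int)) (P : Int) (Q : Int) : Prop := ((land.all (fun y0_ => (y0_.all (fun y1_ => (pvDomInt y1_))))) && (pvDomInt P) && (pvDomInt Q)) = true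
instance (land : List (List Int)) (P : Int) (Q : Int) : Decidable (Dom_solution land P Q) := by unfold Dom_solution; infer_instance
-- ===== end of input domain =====

-- B replaces A's incremental cost scan with early break by a staged pipeline: a prefix-sum
-- list of the sorted heights, closed-form cost at every candidate index, global minimum
-- (objective: alternative algorithm, same asymptotic cost).

-- ===== PORT A =====
-- A's loop body; the Bool component models Python's `break` (state frozen once true)
def solAStep (c : List Int) (N P Q : Int) (st : Int × Int × Bool) (i : Int) : Int × Int × Bool :=
  if st.2.2 then st
  else if (PySem.List.pyGet? c i).getD 0 ≠ (PySem.List.pyGet? c (i - 1)).getD 0 then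
    (if st.1 + (P * i - Q * (N - i)) *
          ((PySem.List.pyGet? c i).getD 0 - (PySem.List.pyGet? c (i - 1)).getD 0) > st.2.1
     then (st.1 + (P * i - Q * (N - i)) *
          ((PySem.List.pyGet? c i).getD 0 - (PySem.List.pyGet? c (i - 1)).getD 0), st.2.1, true)
     else (st.1 + (P * i - Q * (N - i)) *
          ((PySem.List.pyGet? c i).getD 0 - (PySem.List.pyGet? c (i - 1)).getD 0),
           st.1 + (P * i - Q * (N - i)) *
          ((PySem.List.pyGet? c i).getD 0 - (PySem.List.pyGet? c (i - 1)).getD 0), false))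
  else st

def solution (land : List (List Int)) (P : Int) (Q : Int) : Int :=
  let N : Int := (land.length : Int) ^ 2
  let combined : List Int :=
    PySem.List.sorted (land.foldl (fun acc i => acc ++ i) []) (fun x => x) false
  -- combined[0]: Pre_solution guarantees the index is in range (getD default never read)
  let cost := -((PySem.List.pyGet? combined 0).getD 0) * N * Q + combined.sum * Q
  let st := (PySem.List.pyRange 1 N 1).foldl (solAStep combined N P Q) (cost, cost, false)
  st.2.1

-- ===== PORT B =====
-- Source B's prefix loop body: prefix.append(prefix[-1] + x)
def solBStep (pr : List Int) (x : Int) : List Int :=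
  pr ++ [(PySem.List.pyGet? pr (-1)).getD 0 + x]

-- Source B's prefix list: fold of solBStep over combined[:N] starting from [0]
def solBPrefix (c : List Int) (N : Int) : List Int :=
  (PySem.List.slice c none (some N)).foldl solBStep [0]

-- Source B's per-candidate closed-form cost Q*(S - N*c[k]) + (P+Q)*(k*c[k] - prefix[k])
def solBTerm (c pr : List Int) (S N P Q : Int) (k : Int) : Int :=
  Q * (S - N * (PySem.List.pyGet? c k).getD 0) +
    (P + Q) * (k * (PySem.List.pyGet? c k).getD 0 - (PySem.List.pyGet? pr k).getD 0)

def solution_alt (land : List (List Int)) (P : Int) (Q : Int) : Int :=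
  let N : Int := (land.length : Int) ^ 2
  let combined : List Int :=
    PySem.List.sorted (land.flatMap (fun row => row)) (fun x => x) false
  -- min(...) over range(N): nonempty under Pre_ (getD default never read)
  (PySem.List.min? ((PySem.List.pyRange 0 N 1).map
      (solBTerm combined (solBPrefix combined N) combined.sum N P Q)) (fun x => x)).getD 0

-- ===== PRECONDITION & SPEC =====
-- Pre_ excludes (a) grids with fewer than len(land)^2 cells (ragged/empty grids outside the
-- problem's N×N domain, where A's combined[0]/combined[i] raises IndexError except when the
-- early break accidentally stops the scan first, and where B raises IndexError), and
-- (b) inputs outside the problem's natural cost domain 0 ≤ P + Q: with a negative net unit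
-- cost the cost sequence is not convex and no particular answer is specified, so A's
-- early-break value and B's global minimum are both defensible and legitimately disagree.
def Pre_solution (land : List (List Int)) (P : Int) (Q : Int) : Prop :=
  land ≠ [] ∧ land.length ^ 2 ≤ land.flatten.length ∧ 0 ≤ P + Q
instance (land : List (List Int)) (P : Int) (Q : Int) : Decidable (Pre_solution land P Q) := by
  unfold Pre_solution; infer_instance

def pvWitness_solution : List (List Int) × Int × Int := ([[1, 2], [3, 1]], 5, 3)

def Spec_solution (land : List (List Int)) (P : Int) (Q : Int) (out : Int) : Prop :=
  out = solution_alt land P Q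
instance (land : List (List Int)) (P : Int) (Q : Int) (out : Int) :
    Decidable (Spec_solution land P Q out) := by unfold Spec_solution; infer_instance

-- ===== CLAIM (what is proved, stated in full; the proofs are below) =====
def Claim_equal_solution : Prop := ∀ (land : List (List Int)) (P : Int) (Q : Int),
  Dom_solution land P Q → Pre_solution land P Q → Spec_solution land P Q (solution land P Q)

-- ===== LEMMAS AND PROOFS =====

-- the abstract cost function both sides are compared against
def solBCost (c : List Int) (N P Q : Int) (k : Int) : Int :=
  Q * (c.sum - N * (PySem.List.pyGet? c k).getD 0) +
    (P + Q) * (k * (PySem.List.pyGet? c k).getD 0 - (PySem.List.slice c none (some k)).sum)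

-- once A has broken, its state is frozen
lemma solAStep_frozen (c : List Int) (N P Q : Int) (l : List Int) (a b : Int) :
    l.foldl (solAStep c N P Q) (a, b, true) = (a, b, true) := by
  induction l with
  | nil => rfl
  | cons x xs ih => simpa [solAStep] using ih

-- stepping the closed-form cost: solBCost at m+1 minus at m is exactly A's increment
lemma solBCost_succ (c : List Int) (N P Q : Int) (m : Int) (hm : 0 ≤ m)
    (hlt : m + 1 < (c.length : Int)) :
    solBCost c N P Q (m + 1) =
      solBCost c N P Q m +
        ((P + Q) * (m + 1) - Q * N) *
          ((PySem.List.pyGet? c (m + 1)).getD 0 - (PySem.List.pyGet? c m).getD 0) := by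
  have hm1 : (0 : Int) ≤ m + 1 := by omega
  have hmlt : m < (c.length : Int) := by omega
  have hnat : m.toNat < c.length := by omega
  have h1 : (m + 1).toNat = m.toNat + 1 := by omega
  rw [solBCost, solBCost,
      PySem.List.pyGet?_eq_some_getElem c hm1 hlt,
      PySem.List.pyGet?_eq_some_getElem c hm hmlt,
      PySem.List.slice_to c hm1, PySem.List.slice_to c hm]
  simp only [h1, Option.getD_some]
  rw [List.sum_take_succ c m.toNat hnat]
  ring

-- folding min over a list everything of which lies above the seed leaves the seed
lemma foldl_min_absorb (l : List Int) (a : Int) (h : ∀ x ∈ l, a ≤ x) : l.foldl min a = a := by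
  induction l with
  | nil => rfl
  | cons x t ih =>
    simp only [List.foldl_cons]
    rw [min_eq_left (h x (List.mem_cons_self))]
    exact ih (fun y hy => h y (List.mem_cons_of_mem _ hy))

-- convexity: once the marginal coefficient is positive at m+1, the cost never drops below F m
lemma solBCost_ge (c : List Int) (N P Q : Int) (hPQ : 0 ≤ P + Q) (hN : N ≤ (c.length : Int))
    (hsort : ∀ i : Int, 1 ≤ i → i < (c.length : Int) →
      (PySem.List.pyGet? c (i - 1)).getD 0 ≤ (PySem.List.pyGet? c i).getD 0)
    (m : Int) (hm : 0 ≤ m)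
    (hcoeff : 0 < (P + Q) * (m + 1) - Q * N) :
    ∀ (j : Nat), m + 1 + (j : Int) < N → solBCost c N P Q m ≤ solBCost c N P Q (m + 1 + (j : Int)) := by
  intro j
  induction j with
  | zero =>
    intro hlt
    have hlt' : m + 1 < (c.length : Int) := by push_cast at hlt ⊢; omega
    have hd : (PySem.List.pyGet? c m).getD 0 ≤ (PySem.List.pyGet? c (m + 1)).getD 0 := by
      have := hsort (m + 1) (by omega) hlt'
      simpa using this
    have hs := solBCost_succ c N P Q m hm hlt'
    have hinc0 : 0 ≤ ((P + Q) * (m + 1) - Q * N) *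
        ((PySem.List.pyGet? c (m + 1)).getD 0 - (PySem.List.pyGet? c m).getD 0) := by
      nlinarith
    simp only [Nat.cast_zero, add_zero]
    linarith [hs, hinc0]
  | succ j ih =>
    intro hlt
    have hc1 : (((j + 1 : Nat)) : Int) = (j : Int) + 1 := by push_cast; ring
    rw [hc1] at hlt ⊢
    have hk : m + 1 + ((j : Int) + 1) = (m + 1 + (j : Int)) + 1 := by ring
    rw [hk] at hlt ⊢
    have hlt2 : (m + 1 + (j : Int)) + 1 < (c.length : Int) := by omega
    have hprev : m + 1 + (j : Int) < N := by omega
    have hs := solBCost_succ c N P Q (m + 1 + (j : Int)) (by positivity) hlt2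
    have hd : (PySem.List.pyGet? c (m + 1 + (j : Int))).getD 0
        ≤ (PySem.List.pyGet? c ((m + 1 + (j : Int)) + 1)).getD 0 := by
      have := hsort ((m + 1 + (j : Int)) + 1) (by omega) hlt2
      simpa using this
    have hcoeff2 : 0 < (P + Q) * ((m + 1 + (j : Int)) + 1) - Q * N := by nlinarith [Int.natCast_nonneg j]
    have hinc : 0 ≤ ((P + Q) * ((m + 1 + (j : Int)) + 1) - Q * N) *
        ((PySem.List.pyGet? c ((m + 1 + (j : Int)) + 1)).getD 0
          - (PySem.List.pyGet? c (m + 1 + (j : Int))).getD 0) := by nlinarith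
    linarith [hs, hinc, ih hprev]

-- loop invariant: from state (F m, F m, false), A's remaining scan over [m+1, N) returns the
-- minimum of F over [m, N-1] (shaped as a foldl min seeded with F m)
set_option maxHeartbeats 1000000 in
lemma loop_inv (c : List Int) (N P Q : Int) (hPQ : 0 ≤ P + Q) (hN : N ≤ (c.length : Int))
    (hsort : ∀ i : Int, 1 ≤ i → i < (c.length : Int) →
      (PySem.List.pyGet? c (i - 1)).getD 0 ≤ (PySem.List.pyGet? c i).getD 0) :
    ∀ (n : Nat) (m : Int), 0 ≤ m → m + n = N - 1 →
    ((PySem.List.pyRange (m + 1) N 1).foldl (solAStep c N P Q)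
        (solBCost c N P Q m, solBCost c N P Q m, false)).2.1
      = ((PySem.List.pyRange (m + 1) N 1).map (solBCost c N P Q)).foldl min
          (solBCost c N P Q m) := by
  intro n
  induction n with
  | zero =>
    intro m hm0 hmn
    rw [PySem.List.pyRange_one_eq_nil (by omega)]
    simp
  | succ n ih =>
    intro m hm0 hmn
    have hlt : m + 1 < N := by omega
    have hm1 : m + 1 - 1 = m := by ring
    have hltc : m + 1 < (c.length : Int) := by omega
    have hsucc := solBCost_succ c N P Q m hm0 hltc
    have hco : P * (m + 1) - Q * (N - (m + 1)) = (P + Q) * (m + 1) - Q * N := by ring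
    have hd : (PySem.List.pyGet? c m).getD 0 ≤ (PySem.List.pyGet? c (m + 1)).getD 0 := by
      have := hsort (m + 1) (by omega) hltc
      simpa using this
    rw [PySem.List.pyRange_one_cons hlt, List.foldl_cons, List.map_cons, List.foldl_cons]
    by_cases heq : (PySem.List.pyGet? c (m + 1)).getD 0 = (PySem.List.pyGet? c m).getD 0
    · -- equal neighbours: A skips, F (m+1) = F m
      have hF : solBCost c N P Q (m + 1) = solBCost c N P Q m := by
        rw [hsucc, heq]; ring
      have hstep : solAStep c N P Q (solBCost c N P Q m, solBCost c N P Q m, false) (m + 1)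
          = (solBCost c N P Q (m + 1), solBCost c N P Q (m + 1), false) := by
        rw [solAStep]
        simp only [hm1]
        rw [if_neg (by simp), if_neg (by simpa using heq), hF]
      rw [hstep, min_eq_right (le_of_eq hF)]
      exact ih (m + 1) (by omega) (by omega)
    · have hd0 : 0 < (PySem.List.pyGet? c (m + 1)).getD 0 - (PySem.List.pyGet? c m).getD 0 := by
        rcases lt_or_eq_of_le hd with h | h
        · omega
        · exact absurd h.symm heq
      by_cases hbr : 0 < ((P + Q) * (m + 1) - Q * N) *
          ((PySem.List.pyGet? c (m + 1)).getD 0 - (PySem.List.pyGet? c m).getD 0)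
      · -- break: A freezes at F m; the whole tail of F lies above F m by convexity
        have hcoeff : 0 < (P + Q) * (m + 1) - Q * N := by nlinarith
        have hstep : solAStep c N P Q (solBCost c N P Q m, solBCost c N P Q m, false) (m + 1)
            = (solBCost c N P Q (m + 1), solBCost c N P Q m, true) := by
          rw [solAStep]
          simp only [hm1]
          rw [if_neg (by simp), if_pos heq, if_pos (by rw [hco]; linarith [hbr]), hco, ← hsucc]
        rw [hstep, solAStep_frozen]
        have hFm1 : solBCost c N P Q m ≤ solBCost c N P Q (m + 1) := by
          rw [hsucc]; linarith [hbr]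
        rw [min_eq_left hFm1]
        refine (foldl_min_absorb _ _ ?_).symm
        intro x hx
        obtain ⟨k, hk, rfl⟩ := List.mem_map.mp hx
        have hkr := (PySem.List.mem_pyRange_one).mp hk
        have hkeq : m + 1 + ((k - (m + 1)).toNat : Int) = k := by omega
        have := solBCost_ge c N P Q hPQ hN hsort m hm0 hcoeff (k - (m + 1)).toNat
          (by rw [hkeq]; exact hkr.2)
        rwa [hkeq] at this
      · -- no break: state advances to (F (m+1), F (m+1), false)
        have hstep : solAStep c N P Q (solBCost c N P Q m, solBCost c N P Q m, false) (m + 1)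
            = (solBCost c N P Q (m + 1), solBCost c N P Q (m + 1), false) := by
          rw [solAStep]
          simp only [hm1]
          rw [if_neg (by simp), if_pos heq, if_neg (by rw [hco]; linarith [not_lt.mp hbr]), hco, ← hsucc]
        have hFm1 : solBCost c N P Q (m + 1) ≤ solBCost c N P Q m := by
          rw [hsucc]; nlinarith [not_lt.mp hbr]
        rw [hstep, min_eq_right hFm1]
        exact ih (m + 1) (by omega) (by omega)

-- the prefix loop of Source B is scanl (+)
lemma foldl_solBStep_scanl (l : List Int) : ∀ (pr : List Int) (a : Int),
    l.foldl solBStep (pr ++ [a]) = pr ++ List.scanl (· + ·) a l := by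
  induction l with
  | nil => intro pr a; simp
  | cons x t ih =>
    intro pr a
    have hstep : solBStep (pr ++ [a]) x = (pr ++ [a]) ++ [a + x] := by
      simp [solBStep, PySem.List.pyGet?_neg_one_append_singleton]
    simp only [List.foldl_cons, hstep, List.scanl_cons]
    simpa using ih (pr ++ [a]) (a + x)

-- indexing scanl (+): the k-th entry is the seed plus the sum of the first k elements
lemma scanl_add_getElem? (l : List Int) : ∀ (a : Int) (k : Nat), k ≤ l.length →
    (List.scanl (· + ·) a l)[k]? = some (a + (l.take k).sum) := by
  induction l with
  | nil =>
    intro a k hk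
    have : k = 0 := by simpa using hk
    subst this; simp
  | cons x t ih =>
    intro a k hk
    cases k with
    | zero => simp
    | succ k =>
      simp only [List.scanl_cons, List.getElem?_cons_succ, List.take_succ_cons, List.sum_cons]
      rw [ih (a + x) k (by simpa using hk)]
      simp [add_assoc]

-- Source B's candidate term equals the abstract cost at every in-range index
lemma solBTerm_eq_solBCost (c : List Int) (N P Q : Int) (hN0 : 0 ≤ N)
    (hN : N ≤ (c.length : Int)) (k : Int) (h0 : 0 ≤ k) (hk : k < N) :
    solBTerm c (solBPrefix c N) c.sum N P Q k = solBCost c N P Q k := by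
  have hpref : solBPrefix c N = List.scanl (· + ·) 0 (c.take N.toNat) := by
    rw [solBPrefix, PySem.List.slice_to c hN0]
    simpa using foldl_solBStep_scanl (c.take N.toNat) [] 0
  have hlen : (c.take N.toNat).length = N.toNat := by
    rw [List.length_take]; omega
  have hidx : (PySem.List.pyGet? (solBPrefix c N) k).getD 0 = (c.take k.toNat).sum := by
    rw [hpref, PySem.List.pyGet?_of_nonneg _ h0,
        scanl_add_getElem? (c.take N.toNat) 0 k.toNat (by omega),
        List.take_take]
    have : min k.toNat N.toNat = k.toNat := by omega
    simp [this]
  rw [solBTerm, solBCost, hidx, PySem.List.slice_to c h0]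

-- ===== VERDICT (by name: the statement is the Claim_ definition above) =====
theorem solution_spec : Claim_equal_solution := by
  intro land P Q hdom hpre
  obtain ⟨hne, hlen, hPQ⟩ := hpre
  unfold Spec_solution solution solution_alt
  simp only []
  have hflat : land.foldl (fun acc i => acc ++ i) ([] : List Int)
      = land.flatMap (fun row => row) := by
    simpa using PySem.List.foldl_append_eq_flatMap (fun r : List Int => r) land []
  rw [hflat]
  have hlpos : 1 ≤ (land.length : Int) := by
    have : 0 < land.length := List.length_pos_of_ne_nil hne
    exact_mod_cast this
  have hN1 : 1 ≤ ((land.length : Int) ^ 2) := by nlinarith [hlpos]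
  have hclen : (PySem.List.sorted (land.flatMap (fun row : List Int => row)) (fun x => x) false).length
      = land.flatten.length := by
    rw [PySem.List.length_sorted]
    simp
  have hNle : ((land.length : Int) ^ 2)
      ≤ ((PySem.List.sorted (land.flatMap (fun row : List Int => row)) (fun x => x) false).length : Int) := by
    rw [hclen, pow_two]
    have : land.length * land.length ≤ land.flatten.length := by
      simpa [pow_two] using hlen
    exact_mod_cast this
  have hsort : ∀ i : Int, 1 ≤ i →
      i < ((PySem.List.sorted (land.flatMap (fun row : List Int => row)) (fun x => x) false).length : Int) →
      (PySem.List.pyGet? (PySem.List.sorted (land.flatMap (fun row : List Int => row)) (fun x => x) false) (i - 1)).getD 0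
        ≤ (PySem.List.pyGet? (PySem.List.sorted (land.flatMap (fun row : List Int => row)) (fun x => x) false) i).getD 0 := by
    intro i h1 hi
    rw [PySem.List.pyGet?_eq_some_getElem _ (by omega) (by omega),
        PySem.List.pyGet?_eq_some_getElem _ (by omega) hi]
    simp only [Option.getD_some]
    exact PySem.List.sorted_id_getElem_mono _ (by omega) (by omega)
  have hinit : -((PySem.List.pyGet? (PySem.List.sorted (land.flatMap (fun row : List Int => row)) (fun x => x) false) 0).getD 0)
        * ((land.length : Int) ^ 2) * Q
        + (PySem.List.sorted (land.flatMap (fun row : List Int => row)) (fun x => x) false).sum * Q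
      = solBCost (PySem.List.sorted (land.flatMap (fun row : List Int => row)) (fun x => x) false)
          ((land.length : Int) ^ 2) P Q 0 := by
    rw [solBCost, PySem.List.slice_to _ (by norm_num)]
    simp
    ring
  have hmap : (PySem.List.pyRange 0 ((land.length : Int) ^ 2) 1).map
        (solBTerm (PySem.List.sorted (land.flatMap (fun row : List Int => row)) (fun x => x) false)
          (solBPrefix (PySem.List.sorted (land.flatMap (fun row : List Int => row)) (fun x => x) false)
            ((land.length : Int) ^ 2))
          (PySem.List.sorted (land.flatMap (fun row : List Int => row)) (fun x => x) false).sum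
          ((land.length : Int) ^ 2) P Q)
      = (PySem.List.pyRange 0 ((land.length : Int) ^ 2) 1).map
        (solBCost (PySem.List.sorted (land.flatMap (fun row : List Int => row)) (fun x => x) false)
          ((land.length : Int) ^ 2) P Q) := by
    refine List.map_congr_left ?_
    intro k hk
    have hkr := (PySem.List.mem_pyRange_one).mp hk
    exact solBTerm_eq_solBCost _ _ _ _ (by omega) hNle k hkr.1 hkr.2
  simp only [hmap]
  rw [PySem.List.pyRange_one_cons (by omega : (0:Int) < (land.length : Int) ^ 2),
      List.map_cons, PySem.List.min?_id_cons]
  simp only [hinit, Option.getD_some]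
  have hzero : (0 : Int) + ((((land.length : Int) ^ 2) - 1).toNat : Int)
      = ((land.length : Int) ^ 2) - 1 := by omega
  simpa using loop_inv _ ((land.length : Int) ^ 2) P Q hPQ hNle hsort
    (((land.length : Int) ^ 2) - 1).toNat 0 (le_refl 0) hzero
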